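-- pv_equiv track=rewrite | github.com/DiyorbekAzimqulov/ProblemSolving | JimOrder.py | jimOrders
-- ===== SOURCE A (Python) =====
-- def jimOrders(orders):
--     # Write your code here
--     result = []
--     serve_time = []
--
--     for order in orders:
--         serve_time.append(order[0] + order[1])
--     times = []
--     for i in sorted(serve_time):
--         if i not in times:
--             times.append(i)
--
--     for time in times:
--         index = 1
--         for order in orders:
--             if time == order[0] + order[1]:
--                 result.append(index)
--             index += 1
--     return result
-- ===== SOURCE B (Python) =====
-- def jimOrders(orders):
--     pairs = sorted((order[0] + order[1], i) for i, order in enumerate(orders, 1))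
--     return [i for _, i in pairs]
-- ===== Notes on version B (the rewrite author's own statement) =====
-- stated objective: simpler
-- what changed: Replaces A's three passes (collect times, dedup the sorted times, then rescan all orders once per unique time) with a single build of (serve_time, 1-based index) pairs, one lexicographic sort, and one extraction pass; ties break on ascending index exactly as A's per-time in-order rescan does.
import Mathlib
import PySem

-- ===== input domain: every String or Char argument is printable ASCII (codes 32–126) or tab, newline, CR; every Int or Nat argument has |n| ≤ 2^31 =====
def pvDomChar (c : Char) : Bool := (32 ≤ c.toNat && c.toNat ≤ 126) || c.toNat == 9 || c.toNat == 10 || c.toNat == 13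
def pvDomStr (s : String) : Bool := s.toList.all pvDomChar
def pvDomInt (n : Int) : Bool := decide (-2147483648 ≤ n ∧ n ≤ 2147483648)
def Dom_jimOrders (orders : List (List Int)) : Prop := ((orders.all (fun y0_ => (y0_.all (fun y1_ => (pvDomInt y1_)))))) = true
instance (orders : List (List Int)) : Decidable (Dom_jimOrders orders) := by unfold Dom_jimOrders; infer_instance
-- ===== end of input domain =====

-- B replaces A's per-unique-time rescans of all orders by one build of (serve_time, index)
-- pairs, one lexicographic sort and one extraction pass (objective: simpler).
-- Under Pre_ (every order has ≥ 2 entries) the pyGetD accesses below are exact ports of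
-- order[0] / order[1] (the index is always in range, so the default is never used).

-- ===== PORT A =====
def jimOrders (orders : List (List Int)) : List Int :=
  let serve_time : List Int :=
    orders.foldl (fun acc order =>
      acc ++ [PySem.List.pyGetD order 0 0 + PySem.List.pyGetD order 1 0]) []
  let times : List Int :=
    (PySem.List.sorted serve_time (fun x => x) false).foldl
      (fun ts i => if ts.contains i then ts else ts ++ [i]) []
  times.foldl (fun result time =>
    (orders.foldl
      (fun (st : List Int × Int) order =>
        (if time == PySem.List.pyGetD order 0 0 + PySem.List.pyGetD order 1 0
         then st.1 ++ [st.2] else st.1,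
         st.2 + 1))
      (result, (1 : Int))).1) []

-- ===== PORT B =====
def jimOrders_alt (orders : List (List Int)) : List Int :=
  let pairs : List (Int × Int) :=
    (PySem.List.enumerate orders 1).map
      (fun io => (PySem.List.pyGetD io.2 0 0 + PySem.List.pyGetD io.2 1 0, io.1))
  (PySem.List.sorted2 pairs (fun p => p.1) (fun p => p.2) false).map (fun p => p.2)

-- ===== PRECONDITION & SPEC =====
-- Pre_ excludes exactly the inputs where Python A raises IndexError (an order with
-- fewer than two entries); B raises there too.
def Pre_jimOrders (orders : List (List Int)) : Prop := ∀ o ∈ orders, 2 ≤ o.length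
instance (orders : List (List Int)) : Decidable (Pre_jimOrders orders) := by
  unfold Pre_jimOrders; infer_instance
def pvWitness_jimOrders : List (List Int) := [[1, 2], [3, 1], [2, 2], [0, 3]]

def Spec_jimOrders (orders : List (List Int)) (out : List Int) : Prop := out = jimOrders_alt orders
instance (orders : List (List Int)) (out : List Int) : Decidable (Spec_jimOrders orders out) := by
  unfold Spec_jimOrders; infer_instance

-- ===== CLAIM (what is proved, stated in full; the proofs are below) =====
def Claim_equal_jimOrders : Prop :=
  ∀ (orders : List (List Int)), Dom_jimOrders orders → Pre_jimOrders orders →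
    Spec_jimOrders orders (jimOrders orders)

-- ===== LEMMAS AND PROOFS =====

-- serve time of one order, and the (serve_time, 1-based index) pair list
def pvServe (o : List Int) : Int := PySem.List.pyGetD o 0 0 + PySem.List.pyGetD o 1 0
def pvPairs (orders : List (List Int)) : List (Int × Int) :=
  (PySem.List.enumerate orders 1).map (fun io => (pvServe io.2, io.1))
def pvTimes (orders : List (List Int)) : List Int :=
  PySem.Set.ofList (PySem.List.sorted (orders.map pvServe) (fun x => x) false)

-- folding the serve-time expression of the ports into pvServe (definitional)
lemma serve_fold (o : List Int) :
    PySem.List.pyGetD o 0 0 + PySem.List.pyGetD o 1 0 = pvServe o := rfl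

-- A's dedup loop is Set.ofList
lemma times_eq_ofList (xs : List Int) :
    xs.foldl (fun ts i => if ts.contains i then ts else ts ++ [i]) [] = PySem.Set.ofList xs := by
  rw [PySem.Set.ofList_eq_foldl]
  rfl

-- Set.ofList keeps a sublist of its input
lemma foldl_add_sublist {α : Type} [BEq α] :
    ∀ (xs acc : List α), List.Sublist (xs.foldl PySem.Set.add acc) (acc ++ xs)
  | [], acc => by simp
  | x :: xs, acc => by
    simp only [List.foldl_cons]
    have h := foldl_add_sublist xs (PySem.Set.add acc x)
    apply h.trans
    unfold PySem.Set.add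
    split
    · exact List.Sublist.append_left (List.sublist_cons_self x xs) acc
    · simp

lemma ofList_sublist {α : Type} [BEq α] (xs : List α) :
    List.Sublist (PySem.Set.ofList xs) xs := by
  rw [PySem.Set.ofList_eq_foldl]
  simpa using foldl_add_sublist xs []

-- pvTimes is strictly increasing
lemma pvTimes_pairwise_lt (orders : List (List Int)) : (pvTimes orders).Pairwise (· < ·) := by
  have hle : (pvTimes orders).Pairwise (· ≤ ·) :=
    (PySem.List.sorted_pairwise (orders.map pvServe) (fun x => x)).sublist
      (ofList_sublist _)
  have hne : (pvTimes orders).Pairwise (· ≠ ·) := PySem.Set.nodup_ofList _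
  exact (hle.and hne).imp (fun h => lt_of_le_of_ne h.1 h.2)

-- every serve time occurs in pvTimes
lemma mem_pvTimes (orders : List (List Int)) (p : Int × Int) (hp : p ∈ pvPairs orders) :
    p.1 ∈ pvTimes orders := by
  rw [pvTimes, PySem.Set.mem_ofList,
      (PySem.List.sorted_perm (orders.map pvServe) (fun x => x) false).mem_iff]
  rcases List.mem_map.1 hp with ⟨io, hio, rfl⟩
  rcases (PySem.List.mem_enumerate_iff _ _ _).1 hio with ⟨k, hk, rfl⟩
  exact List.mem_map.2 ⟨orders[k], by simp, rfl⟩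

-- pvPairs has strictly increasing indices
lemma pvPairs_pairwise_snd (orders : List (List Int)) :
    (pvPairs orders).Pairwise (fun p q => p.2 < q.2) := by
  rw [pvPairs, List.pairwise_map]
  exact PySem.List.pairwise_lt_enumerate orders 1

-- splitting by distinct covering keys is a permutation
lemma perm_flatMap_filter :
    ∀ (ts : List Int) (ps : List (Int × Int)), ts.Nodup → (∀ p ∈ ps, p.1 ∈ ts) →
      (ts.flatMap (fun t => ps.filter (fun p => t == p.1))).Perm ps
  | [], ps, _, hcov => by
    have : ps = [] := List.eq_nil_iff_forall_not_mem.2 (fun p hp => by simpa using hcov p hp)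
    simp [this]
  | t :: ts, ps, hnd, hcov => by
    rw [List.flatMap_cons]
    have hgrp : ∀ t' ∈ ts, ps.filter (fun p => t' == p.1)
        = (ps.filter (fun p => !(t == p.1))).filter (fun p => t' == p.1) := by
      intro t' ht'
      rw [List.filter_filter]
      apply List.filter_congr
      intro p _
      have : t ≠ t' := fun h => (List.nodup_cons.1 hnd).1 (h ▸ ht')
      by_cases h : t' = p.1 <;> simp_all
    have hrw : ts.flatMap (fun t' => ps.filter (fun p => t' == p.1))
        = ts.flatMap (fun t' => (ps.filter (fun p => !(t == p.1))).filter
            (fun p => t' == p.1)) := by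
      apply List.flatMap_congr; intro t' ht'; exact hgrp t' ht'
    rw [hrw]
    have hcov' : ∀ p ∈ ps.filter (fun p => !(t == p.1)), p.1 ∈ ts := by
      intro p hp
      rcases List.mem_filter.1 hp with ⟨hps, hne⟩
      rcases List.mem_cons.1 (hcov p hps) with h | h
      · simp_all
      · exact h
    have ih := perm_flatMap_filter ts (ps.filter (fun p => !(t == p.1)))
      (List.nodup_cons.1 hnd).2 hcov'
    exact (ih.append_left (ps.filter (fun p => t == p.1))).trans
      (List.filter_append_perm (fun p => t == p.1) ps)

-- splitting by increasing keys is lexicographically sorted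
lemma pairwise_lex_flatMap :
    ∀ (ts : List Int) (ps : List (Int × Int)), ts.Pairwise (· < ·) →
      ps.Pairwise (fun p q => p.2 < q.2) →
      (ts.flatMap (fun t => ps.filter (fun p => t == p.1))).Pairwise
        (fun p q => toLex (p.1, p.2) < toLex (q.1, q.2))
  | [], _, _, _ => by simp
  | t :: ts, ps, hts, hps => by
    rw [List.flatMap_cons, List.pairwise_append]
    refine ⟨?_, pairwise_lex_flatMap ts ps (List.pairwise_cons.1 hts).2 hps, ?_⟩
    · apply (hps.filter _).imp_of_mem
      intro p q hp hq h
      have hp1 : t = p.1 := by simpa using (List.mem_filter.1 hp).2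
      have hq1 : t = q.1 := by simpa using (List.mem_filter.1 hq).2
      exact Prod.Lex.lt_iff.2 (Or.inr ⟨hp1 ▸ hq1 ▸ rfl, h⟩)
    · intro p hp q hq
      rcases List.mem_flatMap.1 hq with ⟨t', ht', hq'⟩
      have hp1 : t = p.1 := by simpa using (List.mem_filter.1 hp).2
      have hq1 : t' = q.1 := by simpa using (List.mem_filter.1 hq').2
      have htt : t < t' := (List.pairwise_cons.1 hts).1 t' ht'
      exact Prod.Lex.lt_iff.2 (Or.inl (hp1 ▸ hq1 ▸ htt))

-- Python's tuple sort is the sort by the lexicographic key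
lemma sorted2_eq_sorted_lex {α : Type} (xs : List α) (k1 k2 : α → Int) :
    PySem.List.sorted2 xs k1 k2 false
      = PySem.List.sorted xs (fun x => toLex (k1 x, k2 x)) false := by
  rw [PySem.List.sorted_eq_foldl_insertBy]
  show List.foldl (fun acc x => PySem.List.insertBy _ x acc) [] xs = _
  congr 1
  funext acc x
  congr 1
  funext a b
  rcases lt_trichotomy (k1 a) (k1 b) with h | h | h <;>
    simp [Prod.Lex.lt_iff, h, lt_asymm, ne_of_lt]

-- B's sort names A's grouped concatenation
lemma sorted_pairs_eq (orders : List (List Int)) :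
    PySem.List.sorted2 (pvPairs orders) (fun p => p.1) (fun p => p.2) false
      = (pvTimes orders).flatMap (fun t => (pvPairs orders).filter (fun p => t == p.1)) := by
  rw [sorted2_eq_sorted_lex]
  exact PySem.List.sorted_eq_of_perm_of_pairwise_lt _ _ _
    (perm_flatMap_filter _ _ (PySem.Set.nodup_ofList _) (mem_pvTimes orders))
    (pairwise_lex_flatMap _ _ (pvTimes_pairwise_lt orders) (pvPairs_pairwise_snd orders))

-- A's inner indexed scan over orders
lemma inner_loop (t : Int) :
    ∀ (os : List (List Int)) (res : List Int) (k : Int),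
      (os.foldl
        (fun (st : List Int × Int) order =>
          (if t == pvServe order then st.1 ++ [st.2] else st.1, st.2 + 1))
        (res, k)).1
      = res ++ ((PySem.List.enumerate os k).filter (fun io => t == pvServe io.2)).map
          (fun io => io.1)
  | [], res, k => by simp [PySem.List.enumerate_nil]
  | o :: os, res, k => by
    rw [List.foldl_cons, PySem.List.enumerate_cons, List.filter_cons]
    by_cases h : t == pvServe o
    · simp only [h, if_true]
      rw [inner_loop t os (res ++ [k]) (k + 1)]
      simp
    · simp only [h, if_neg, Bool.false_eq_true, not_false_iff]
      exact inner_loop t os res (k + 1)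

-- A computed as grouped index lists
lemma jimOrders_eq_flatMap (orders : List (List Int)) :
    jimOrders orders
      = (pvTimes orders).flatMap (fun t =>
          ((PySem.List.enumerate orders 1).filter (fun io => t == pvServe io.2)).map
            (fun io => io.1)) := by
  unfold jimOrders
  simp only [serve_fold]
  rw [PySem.List.foldl_append_singleton_eq_map pvServe orders [],
      List.nil_append, times_eq_ofList]
  have hfun : ∀ (res : List Int) (t : Int),
      (orders.foldl
        (fun (st : List Int × Int) order =>
          (if t == pvServe order then st.1 ++ [st.2] else st.1, st.2 + 1))
        (res, (1 : Int))).1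
      = res ++ ((PySem.List.enumerate orders 1).filter (fun io => t == pvServe io.2)).map
          (fun io => io.1) := fun res t => inner_loop t orders res 1
  calc (PySem.Set.ofList (PySem.List.sorted (orders.map pvServe) (fun x => x) false)).foldl
        (fun result time =>
          (orders.foldl
            (fun (st : List Int × Int) order =>
              (if time == pvServe order then st.1 ++ [st.2] else st.1, st.2 + 1))
            (result, (1 : Int))).1) []
      = (pvTimes orders).foldl
          (fun result time => result ++
            ((PySem.List.enumerate orders 1).filter (fun io => time == pvServe io.2)).map
              (fun io => io.1)) [] := by
        apply PySem.List.foldl_congr_mem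
        intro res t _
        exact hfun res t
    _ = _ := by
        rw [PySem.List.foldl_append_eq_flatMap]
        simp

-- ===== VERDICT (by name: the statement is the Claim_ definition above) =====
theorem jimOrders_spec : Claim_equal_jimOrders := by
  intro orders _ _
  show jimOrders orders = jimOrders_alt orders
  have hB : jimOrders_alt orders
      = (PySem.List.sorted2 (pvPairs orders) (fun p => p.1) (fun p => p.2) false).map
          (fun p => p.2) := rfl
  rw [jimOrders_eq_flatMap, hB, sorted_pairs_eq, List.map_flatMap]
  apply List.flatMap_congr
  intro t _
  rw [pvPairs, List.filter_map, List.map_map]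
  apply congrArg
  apply List.filter_congr
  intro io _
  rfl
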